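-- pv_equiv track=rewrite | github.com/The-No-Hands-company/Nexus-AI | src/audio.py | _build_turn_taking_summary
-- ===== SOURCE A (Python) =====
-- from typing import Any
--
-- def _build_turn_taking_summary(segments: list[dict[str, Any]]) -> str:
--     if not segments:
--         return "No speech segments detected."
--     if len(segments) == 1:
--         return "Single continuous speaking turn detected."
--     speakers = [str(segment.get("speaker") or "SPEAKER_01") for segment in segments]
--     changes = 0
--     for idx in range(1, len(speakers)):
--         if speakers[idx] != speakers[idx - 1]:
--             changes += 1
--     return f"Detected {len(segments)} spoken turns with {changes} speaker transitions."
-- ===== SOURCE B (Python) =====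
-- def _build_turn_taking_summary(segments):
--     if not segments:
--         return "No speech segments detected."
--     if len(segments) == 1:
--         return "Single continuous speaking turn detected."
--     speakers = [str(segment.get("speaker") or "SPEAKER_01") for segment in segments]
--     # build the list of maximal speaker runs back-to-front: keep a label iff it
--     # differs from the run label most recently kept while walking right-to-left
--     runs = []
--     for label in reversed(speakers):
--         if not runs or label != runs[-1]:
--             runs.append(label)
--     changes = len(runs) - 1
--     return f"Detected {len(segments)} spoken turns with {changes} speaker transitions."
-- ===== Notes on version B (the rewrite author's own statement) =====
-- stated objective: alternative
-- what changed: Instead of an index loop over range(1, n) incrementing a transition counter, B walks the normalized labels in reverse building the list of maximal speaker runs, and reports len(runs) - 1 transitions.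
import Mathlib
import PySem

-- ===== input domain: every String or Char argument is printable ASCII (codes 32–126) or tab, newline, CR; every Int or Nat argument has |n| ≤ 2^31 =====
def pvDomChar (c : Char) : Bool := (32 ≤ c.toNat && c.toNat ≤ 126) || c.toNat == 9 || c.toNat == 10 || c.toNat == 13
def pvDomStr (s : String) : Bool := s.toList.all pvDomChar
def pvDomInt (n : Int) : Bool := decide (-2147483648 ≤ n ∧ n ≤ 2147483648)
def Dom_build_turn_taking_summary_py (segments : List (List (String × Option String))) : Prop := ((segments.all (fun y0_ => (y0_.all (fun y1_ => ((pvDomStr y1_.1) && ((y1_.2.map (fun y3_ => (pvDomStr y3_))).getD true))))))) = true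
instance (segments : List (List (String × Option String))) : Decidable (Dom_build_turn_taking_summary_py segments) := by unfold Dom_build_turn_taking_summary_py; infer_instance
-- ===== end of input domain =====

-- B replaces A's index loop with a transition counter by a reversed walk that builds the
-- list of maximal speaker runs and reports len(runs) - 1; objective: alternative.

-- ===== PORT A =====
-- str(segment.get("speaker") or "SPEAKER_01"): missing key, None and "" are falsy; any other string is returned unchanged.
def pvNormSpeaker (seg : List (String × Option String)) : String :=
  match (PySem.Dict.mk seg).get? "speaker" with
  | some (some s) => if s = "" then "SPEAKER_01" else s
  | _ => "SPEAKER_01"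

def build_turn_taking_summary_py (segments : List (List (String × Option String))) : String :=
  if segments = [] then "No speech segments detected."
  else if segments.length = 1 then "Single continuous speaking turn detected."
  else
    let speakers := segments.map pvNormSpeaker
    let changes : Int := (PySem.List.pyRange 1 (speakers.length : Int) 1).foldl
      (fun acc idx =>
        if PySem.List.pyGetD speakers idx "" ≠ PySem.List.pyGetD speakers (idx - 1) "" then acc + 1 else acc) 0
    "Detected " ++ PySem.Int.toStr (segments.length : Int) ++ " spoken turns with " ++
      PySem.Int.toStr changes ++ " speaker transitions."

-- ===== PORT B =====
-- for label in reversed(speakers): if not runs or label != runs[-1]: runs.append(label)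
-- (runs[-1] is only read when runs is nonempty, so List.getLastD "" is exact).
def build_turn_taking_summary_py_alt (segments : List (List (String × Option String))) : String :=
  if segments = [] then "No speech segments detected."
  else if segments.length = 1 then "Single continuous speaking turn detected."
  else
    let speakers := segments.map pvNormSpeaker
    let runs := speakers.reverse.foldl
      (fun rs label => if rs = [] ∨ label ≠ rs.getLastD "" then rs ++ [label] else rs) []
    let changes : Int := (runs.length : Int) - 1
    "Detected " ++ PySem.Int.toStr (segments.length : Int) ++ " spoken turns with " ++
      PySem.Int.toStr changes ++ " speaker transitions."

-- ===== PRECONDITION & SPEC =====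
def Spec_build_turn_taking_summary_py (segments : List (List (String × Option String))) (out : String) : Prop := out = build_turn_taking_summary_py_alt segments
instance (segments : List (List (String × Option String))) (out : String) : Decidable (Spec_build_turn_taking_summary_py segments out) := by unfold Spec_build_turn_taking_summary_py; infer_instance

-- ===== CLAIM (what is proved, stated in full; the proofs are below) =====
def Claim_equal_build_turn_taking_summary_py : Prop := ∀ (segments : List (List (String × Option String))), Dom_build_turn_taking_summary_py segments → Spec_build_turn_taking_summary_py segments (build_turn_taking_summary_py segments)

-- ===== LEMMAS AND PROOFS =====

-- Proof-side bridges: transition count tracking the previous label, and adjacent-inequality count.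
def pvRunsGo (p : String) : List String → Int
  | [] => 0
  | y :: t => if y == p then pvRunsGo p t else 1 + pvRunsGo y t

def pvAdjNe : List String → Nat
  | x :: y :: t => (if x = y then 0 else 1) + pvAdjNe (y :: t)
  | _ => 0

theorem pvRunsGo_eq_adjNe (t : List String) (p : String) :
    pvRunsGo p t = (pvAdjNe (p :: t) : Int) := by
  induction t generalizing p with
  | nil => simp [pvRunsGo, pvAdjNe]
  | cons y u ih =>
    by_cases h : y = p
    · subst h; simp [pvRunsGo, pvAdjNe, ih]
    · have hb : (y == p) = false := by simp [h]
      have hp : ¬ p = y := fun hh => h hh.symm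
      rw [show pvRunsGo p (y :: u) = 1 + pvRunsGo y u from by simp [pvRunsGo, hb]]
      rw [ih y, show pvAdjNe (p :: y :: u) = 1 + pvAdjNe (y :: u) from by simp [pvAdjNe, hp]]
      push_cast
      ring

theorem pvAdjNe_append_singleton (l : List String) (a : String) :
    pvAdjNe (l ++ [a])
      = pvAdjNe l + (match l.getLast? with | none => 0 | some b => if b = a then 0 else 1) := by
  induction l with
  | nil => simp [pvAdjNe]
  | cons x u ih =>
    cases u with
    | nil => simp [pvAdjNe]
    | cons y v =>
      have : (x :: y :: v) ++ [a] = x :: ((y :: v) ++ [a]) := by simp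
      rw [this]
      have h1 : pvAdjNe (x :: ((y :: v) ++ [a])) = (if x = y then 0 else 1) + pvAdjNe ((y :: v) ++ [a]) := by
        simp [pvAdjNe]
      rw [h1, ih]
      simp [pvAdjNe, List.getLast?_cons_cons]
      omega

theorem pvAdjNe_reverse (l : List String) : pvAdjNe l.reverse = pvAdjNe l := by
  induction l with
  | nil => rfl
  | cons x t ih =>
    rw [List.reverse_cons, pvAdjNe_append_singleton, ih, List.getLast?_reverse]
    cases t with
    | nil => rfl
    | cons y v =>
      simp only [List.head?_cons, pvAdjNe]
      have : (if y = x then 0 else 1) = (if x = y then 0 else 1) := by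
        by_cases h : x = y
        · simp [h]
        · simp [h, fun hh : y = x => h hh.symm]
          exact fun hh => h hh.symm
      omega

-- Invariant of B's run-building loop: each step adds a run iff the label differs from the last kept one.
theorem pvRunLoop_invariant (l : List String) (rs : List String) (p : String)
    (h : rs.getLast? = some p) :
    (l.foldl (fun rs label => if rs = [] ∨ label ≠ rs.getLastD "" then rs ++ [label] else rs) rs).length
      = rs.length + pvAdjNe (p :: l) := by
  induction l generalizing rs p with
  | nil => simp [pvAdjNe]
  | cons y u ih =>
    have hne : rs ≠ [] := by intro hh; rw [hh] at h; simp at h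
    have hlast : rs.getLastD "" = p := by
      rw [List.getLastD_eq_getLast?, h]
      rfl
    by_cases hy : y = p
    · have hcond : ¬ (rs = [] ∨ y ≠ rs.getLastD "") := by
        push_neg; exact ⟨hne, by rw [hlast, hy]⟩
      simp only [List.foldl_cons, if_neg hcond]
      rw [ih rs p h]
      simp [pvAdjNe, hy]
    · have hcond : rs = [] ∨ y ≠ rs.getLastD "" := Or.inr (by rw [hlast]; exact hy)
      simp only [List.foldl_cons, if_pos hcond]
      have h2 : (rs ++ [y]).getLast? = some y := by simp
      rw [ih (rs ++ [y]) y h2]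
      have : ¬ (p = y) := fun hh => hy hh.symm
      simp [pvAdjNe, this]
      omega

-- A's adjacent-pair loop, rebased to Nat indices into (x :: t), equals the transition tracker.
theorem pvNatLoop_eq_runsGo (t : List String) (x : String) (acc : Int) :
    (List.range t.length).foldl
      (fun acc k => if (x :: t).getD (k + 1) "" ≠ (x :: t).getD k "" then acc + 1 else acc) acc
      = acc + pvRunsGo x t := by
  induction t generalizing x acc with
  | nil => simp [pvRunsGo]
  | cons y s ih =>
    simp only [List.length_cons, List.range_succ_eq_map, List.foldl_cons, List.foldl_map]
    have hrw :
        (fun (a : Int) (k : Nat) =>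
          if (x :: y :: s).getD (k + 1 + 1) "" ≠ (x :: y :: s).getD (k + 1) "" then a + 1 else a)
        = (fun (a : Int) (k : Nat) =>
          if (y :: s).getD (k + 1) "" ≠ (y :: s).getD k "" then a + 1 else a) := by
      funext a k; simp
    rw [hrw, ih]
    by_cases h : y = x
    · subst h; simp [pvRunsGo]
    · simp only [List.getD_cons_succ, List.getD_cons_zero]
      rw [if_pos (by simpa using h)]
      simp [pvRunsGo, h]
      ring

-- B's run list on a nonempty label list has length 1 + adjacent-inequality count.
theorem pvRunLoop_length (x : String) (t : List String) :
    (((x :: t).reverse.foldl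
        (fun rs label => if rs = [] ∨ label ≠ rs.getLastD "" then rs ++ [label] else rs)
        ([] : List String)).length : Int)
      = 1 + (pvAdjNe (x :: t) : Int) := by
  obtain ⟨h, u, hrev⟩ : ∃ h u, (x :: t).reverse = h :: u := by
    cases hr : (x :: t).reverse with
    | nil => simp at hr
    | cons h u => exact ⟨h, u, rfl⟩
  rw [hrev, List.foldl_cons]
  have hstep : (if ([] : List String) = [] ∨ h ≠ ([] : List String).getLastD "" then ([] : List String) ++ [h] else []) = [h] := by rw [if_pos (Or.inl rfl)]; rfl
  rw [hstep]
  have h1 : ([h] : List String).getLast? = some h := rfl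
  rw [pvRunLoop_invariant u [h] h h1]
  have h2 : pvAdjNe (h :: u) = pvAdjNe (x :: t) := by
    rw [← hrev, pvAdjNe_reverse]
  simp [h2]

-- ===== VERDICT (by name: the statement is the Claim_ definition above) =====
theorem build_turn_taking_summary_py_spec : Claim_equal_build_turn_taking_summary_py := by
  intro segments _
  unfold Spec_build_turn_taking_summary_py build_turn_taking_summary_py build_turn_taking_summary_py_alt
  cases segments with
  | nil => rfl
  | cons s rest =>
    cases rest with
    | nil => rfl
    | cons s2 rest2 =>
      have hg1 : ¬ (s :: s2 :: rest2 = []) := by simp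
      have hg2 : ¬ ((s :: s2 :: rest2).length = 1) := by simp
      rw [if_neg hg1, if_neg hg2, if_neg hg1, if_neg hg2, List.map_cons]
      have hloop : ∀ (x : String) (t : List String),
          (PySem.List.pyRange 1 (((x :: t).length : Int)) 1).foldl
            (fun acc idx =>
              if PySem.List.pyGetD (x :: t) idx "" ≠ PySem.List.pyGetD (x :: t) (idx - 1) "" then acc + 1 else acc) 0
            = (((x :: t).reverse.foldl
                (fun rs label => if rs = [] ∨ label ≠ rs.getLastD "" then rs ++ [label] else rs)
                ([] : List String)).length : Int) - 1 := by
        intro x t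
        rw [PySem.List.pyRange_one]
        have hlen2 : (((x :: t).length : Int) - 1).toNat = t.length := by simp
        rw [hlen2, List.foldl_map]
        have hfun :
            (fun (acc : Int) (k : Nat) =>
              if PySem.List.pyGetD (x :: t) (1 + (k : Int)) "" ≠ PySem.List.pyGetD (x :: t) (1 + (k : Int) - 1) "" then acc + 1 else acc)
            = (fun (acc : Int) (k : Nat) =>
              if (x :: t).getD (k + 1) "" ≠ (x :: t).getD k "" then acc + 1 else acc) := by
          funext acc k
          have h1 : (1 : Int) + (k : Int) = ((k + 1 : Nat) : Int) := by push_cast; ring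
          rw [h1]
          rw [show ((k + 1 : Nat) : Int) - 1 = ((k : Nat) : Int) by push_cast; ring]
          rw [PySem.List.pyGetD_natCast, PySem.List.pyGetD_natCast]
        rw [hfun, pvNatLoop_eq_runsGo, pvRunsGo_eq_adjNe, pvRunLoop_length]
        ring
      exact congrArg
        (fun z => "Detected " ++ PySem.Int.toStr (((s :: s2 :: rest2).length : Int)) ++ " spoken turns with " ++
          PySem.Int.toStr z ++ " speaker transitions.")
        (hloop (pvNormSpeaker s) ((s2 :: rest2).map pvNormSpeaker))
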